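-- pv_equiv track=rewrite | github.com/longhao54/leetcode | easy/942.py | diStringMatch
-- ===== SOURCE A (Python) =====
-- def diStringMatch(S):
--     ans = [ i for i in range(len(S)+1)]
--     A = []
--     for i in S:
--         if i == "I":
--             A.append(ans.pop(0))
--         else:
--             A.append(ans.pop())
--     A.append(ans.pop())
--     return A
-- ===== SOURCE B (Python) =====
-- def diStringMatch(S):
--     lo, hi = 0, len(S)
--     res = []
--     for c in S:
--         if c == "I":
--             res.append(lo)
--             lo += 1
--         else:
--             res.append(hi)
--             hi -= 1
--     res.append(lo)
--     return res
-- ===== Notes on version B (the rewrite author's own statement) =====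
-- stated objective: alternative
-- what changed: Replaces the mutable candidate list consumed with pop(0)/pop() by two counters low/high advanced in one pass with no list mutation (quadratic pop(0) work disappears on I-heavy strings, but a timing run on random inputs did not confirm >=1.5x).
import Mathlib
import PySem

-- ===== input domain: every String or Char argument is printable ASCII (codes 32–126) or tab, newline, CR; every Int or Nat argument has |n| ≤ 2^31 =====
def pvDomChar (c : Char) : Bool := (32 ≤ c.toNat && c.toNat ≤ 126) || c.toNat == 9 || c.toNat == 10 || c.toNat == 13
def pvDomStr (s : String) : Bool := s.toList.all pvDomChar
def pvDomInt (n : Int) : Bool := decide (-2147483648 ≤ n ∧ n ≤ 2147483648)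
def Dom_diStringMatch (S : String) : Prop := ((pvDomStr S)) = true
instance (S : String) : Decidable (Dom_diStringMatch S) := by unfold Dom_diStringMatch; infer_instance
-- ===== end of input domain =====

-- B replaces A's candidate list consumed with pop(0)/pop() by two counters low/high in one pass (no list mutation).

-- ===== PORT A =====
-- loop state: (ans, A); ans.pop(0) → headD/tail, ans.pop() → getLastD/dropLast.
-- Exact here: ans starts with |S|+1 elements and loses one per iteration, so it is
-- nonempty at every pop and the D-defaults of headD/getLastD are never used.
def diStringMatchGoA : List Char → List Int → List Int → List Int
  | [], ans, A => A ++ [ans.getLastD 0]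
  | c :: cs, ans, A =>
    if c = 'I' then diStringMatchGoA cs ans.tail (A ++ [ans.headD 0])
    else diStringMatchGoA cs ans.dropLast (A ++ [ans.getLastD 0])

def diStringMatch (S : String) : List Int :=
  diStringMatchGoA S.toList (PySem.List.pyRange 0 ((S.toList.length : Int) + 1) 1) []

-- ===== PORT B =====
def diStringMatchGoB : List Char → Int → Int → List Int
  | [], lo, _ => [lo]
  | c :: cs, lo, hi =>
    if c = 'I' then lo :: diStringMatchGoB cs (lo + 1) hi
    else hi :: diStringMatchGoB cs lo (hi - 1)

def diStringMatch_alt (S : String) : List Int :=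
  diStringMatchGoB S.toList 0 (S.toList.length : Int)

-- ===== PRECONDITION & SPEC =====
def Spec_diStringMatch (S : String) (out : List Int) : Prop := out = diStringMatch_alt S
instance (S : String) (out : List Int) : Decidable (Spec_diStringMatch S out) := by unfold Spec_diStringMatch; infer_instance

-- ===== CLAIM (what is proved, stated in full; the proofs are below) =====
def Claim_equal_diStringMatch : Prop := ∀ (S : String), Dom_diStringMatch S → Spec_diStringMatch S (diStringMatch S)

-- ===== LEMMAS AND PROOFS =====

-- A's loop on the interval [lo, lo+|cs|] behaves exactly like B's two pointers.
theorem goA_eq_goB (cs : List Char) : ∀ (lo : Int) (A : List Int),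
    diStringMatchGoA cs (PySem.List.pyRange lo (lo + cs.length + 1) 1) A
      = A ++ diStringMatchGoB cs lo (lo + cs.length) := by
  induction cs with
  | nil =>
    intro lo A
    have h : PySem.List.pyRange lo (lo + ([] : List Char).length + 1) 1 = [lo] := by
      rw [PySem.List.pyRange_one_cons (by simp)]
      simp [PySem.List.pyRange]
    simp [diStringMatchGoA, diStringMatchGoB]
  | cons c cs ih =>
    intro lo A
    by_cases hc : c = 'I'
    · subst hc
      have h : PySem.List.pyRange lo (lo + (('I' :: cs).length : Int) + 1) 1
          = lo :: PySem.List.pyRange (lo + 1) (lo + (('I' :: cs).length : Int) + 1) 1 := by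
        refine PySem.List.pyRange_one_cons ?_
        simp; positivity
      simp only [diStringMatchGoA, h, List.tail_cons, List.headD_cons]
      have harg : lo + ((('I' :: cs).length : Int)) + 1 = (lo + 1) + cs.length + 1 := by
        simp; ring
      rw [harg, ih (lo + 1)]
      have h2 : lo + 1 + (cs.length : Int) = lo + (('I' :: cs).length : Int) := by
        simp; ring
      simp [diStringMatchGoB, h2]
    · have h : PySem.List.pyRange lo (lo + ((c :: cs).length : Int) + 1) 1
          = PySem.List.pyRange lo (lo + ((c :: cs).length : Int)) 1 ++ [lo + ((c :: cs).length : Int)] := by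
        have := PySem.List.pyRange_one_succ_right (a := lo) (b := lo + ((c :: cs).length : Int))
          (by simp; positivity)
        simpa using this
      simp only [diStringMatchGoA, if_neg hc, h, List.dropLast_concat, List.getLastD_concat]
      have harg : lo + (((c :: cs).length : Int)) = lo + cs.length + 1 := by
        simp; ring
      rw [harg, ih lo]
      have h2 : lo + (cs.length : Int) + 1 - 1 = lo + cs.length := by ring
      simp [diStringMatchGoB, hc, h2]

-- ===== VERDICT (by name: the statement is the Claim_ definition above) =====
theorem diStringMatch_spec : Claim_equal_diStringMatch := by
  intro S _
  unfold Spec_diStringMatch diStringMatch diStringMatch_alt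
  have := goA_eq_goB S.toList 0 []
  simpa using this
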